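-- pv_equiv track=rewrite | github.com/mtlynch/migrate-mtlynch-to-hugo | app/book_reports.py | _translate_frontmatter
-- ===== SOURCE A (Python) =====
-- def _translate_frontmatter(contents):
--     triple_underscores = 0
--     lines = []
--     for line in contents.split('\n'):
--         if line.startswith('---'):
--             triple_underscores += 1
--             lines.append(line)
--             continue
--         if triple_underscores == 1:
--             if line.startswith('read_date: '):
--                 _, read_date = line.split('read_date: ')
--                 lines.append('date: \'%s\'' % read_date.strip())
--                 continue
--             elif line.startswith('  score: '):
--                 _, rating = line.split('  score: ')
--                 lines.append('rating: %s' % rating.strip())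
--                 continue
--             elif line.startswith('  link_url: '):
--                 _, purchase_url = line.split('  link_url: ')
--                 lines.append('purchase_url: %s' % purchase_url.strip())
--                 continue
--             elif line.startswith('title: '):
--                 lines.append(line)
--                 continue
--             else:
--                 continue
--         lines.append(line)
--     return '\n'.join(lines)
-- ===== SOURCE B (Python) =====
-- def _transform_line(line):
--     if line.startswith('read_date: '):
--         _, rest = line.split('read_date: ')
--         return "date: '%s'" % rest.strip()
--     if line.startswith('  score: '):
--         _, rest = line.split('  score: ')
--         return 'rating: %s' % rest.strip()
--     if line.startswith('  link_url: '):
--         _, rest = line.split('  link_url: ')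
--         return 'purchase_url: %s' % rest.strip()
--     if line.startswith('title: '):
--         return line
--     return None
--
--
-- def _translate_frontmatter(contents):
--     lines = contents.split('\n')
--     i = next((k for k, l in enumerate(lines) if l.startswith('---')), None)
--     if i is None:
--         return contents
--     j = next((k for k in range(i + 1, len(lines))
--               if lines[k].startswith('---')), len(lines))
--     out = lines[:i + 1]
--     for line in lines[i + 1:j]:
--         t = _transform_line(line)
--         if t is not None:
--             out.append(t)
--     out.extend(lines[j:])
--     return '\n'.join(out)
-- ===== Notes on version B (the rewrite author's own statement) =====
-- stated objective: alternative
-- what changed: B drops A's running '---' counter with per-line state: it locates the two frontmatter boundary lines up front, rewrites only the slice between them via a table-driven per-line rename, and reassembles head + transformed middle + tail; Pre_ excludes only inputs on which A (and B alike) raises ValueError.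
import Mathlib
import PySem

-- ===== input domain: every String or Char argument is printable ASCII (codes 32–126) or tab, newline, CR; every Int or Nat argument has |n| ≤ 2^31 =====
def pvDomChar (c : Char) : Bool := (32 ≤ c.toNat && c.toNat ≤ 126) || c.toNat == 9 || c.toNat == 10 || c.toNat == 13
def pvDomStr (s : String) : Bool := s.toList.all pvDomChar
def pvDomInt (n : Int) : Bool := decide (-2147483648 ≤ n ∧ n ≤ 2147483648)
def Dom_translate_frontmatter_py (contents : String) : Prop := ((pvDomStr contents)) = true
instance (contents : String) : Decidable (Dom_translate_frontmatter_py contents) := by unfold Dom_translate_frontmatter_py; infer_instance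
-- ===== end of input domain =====

-- B replaces A's running '---' counter with an upfront computation of the frontmatter
-- boundaries (first '---' line and the next one) and a table-driven per-line rename;
-- objective: alternative decomposition, same cost. Equivalence of RETURN values is proved
-- on Pre_ (A raises ValueError when a frontmatter line contains its own marker twice).

-- shared: "line.startswith('---')"
def pvMarker (l : String) : Bool := PySem.Str.startswith l "---"

-- shared: Python's "_, rest = parts" for a split result: the second element when there are
-- exactly two parts; none exactly where Python raises ValueError (excluded by Pre_)
def pvUnpack2 (parts : Option (List String)) : Option String :=
  match parts with
  | some [_, r] => some r
  | _ => none

-- ===== PORT A =====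
-- one iteration of A's loop over (triple_underscores, lines)
def pvStepA (st : Int × List String) (line : String) : Int × List String :=
  if pvMarker line then (st.1 + 1, st.2 ++ [line])
  else if st.1 == 1 then
    if PySem.Str.startswith line "read_date: " then
      match pvUnpack2 (PySem.Str.split? line "read_date: ") with
      | some r => (st.1, st.2 ++ ["date: '" ++ PySem.Str.strip r ++ "'"])
      | none => st
    else if PySem.Str.startswith line "  score: " then
      match pvUnpack2 (PySem.Str.split? line "  score: ") with
      | some r => (st.1, st.2 ++ ["rating: " ++ PySem.Str.strip r])
      | none => st
    else if PySem.Str.startswith line "  link_url: " then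
      match pvUnpack2 (PySem.Str.split? line "  link_url: ") with
      | some r => (st.1, st.2 ++ ["purchase_url: " ++ PySem.Str.strip r])
      | none => st
    else if PySem.Str.startswith line "title: " then (st.1, st.2 ++ [line])
    else st
  else (st.1, st.2 ++ [line])

def translate_frontmatter_py (contents : String) : String :=
  PySem.Str.join "\n"
    ((((PySem.Str.split? contents "\n").getD []).foldl pvStepA ((0 : Int), [])).2)

-- ===== PORT B =====
-- rename table: (old prefix, new prefix, suffix); "fmt % rest.strip()" = newpre ++ strip ++ suffix
def pvRenames : List (String × String × String) :=
  [("read_date: ", "date: '", "'"),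
   ("  score: ", "rating: ", ""),
   ("  link_url: ", "purchase_url: ", "")]

def pvTransformLine (line : String) : Option String :=
  match pvRenames.find? (fun e => PySem.Str.startswith line e.1) with
  | some (pre, left, right) =>
    match pvUnpack2 (PySem.Str.split? line pre) with
    | some r => some (left ++ PySem.Str.strip r ++ right)
    | none => none
  | none => if PySem.Str.startswith line "title: " then some line else none

def translate_frontmatter_py_alt (contents : String) : String :=
  let ls := (PySem.Str.split? contents "\n").getD []
  let i := ls.findIdx pvMarker            -- first '---' line, ls.length if none
  let head := ls.take (i + 1)
  let body := ls.drop (i + 1)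
  let j := body.findIdx pvMarker          -- next '---' line, body.length if none
  PySem.Str.join "\n" (head ++ (body.take j).filterMap pvTransformLine ++ body.drop j)

-- ===== PRECONDITION & SPEC =====
-- a frontmatter line is safe when the field marker it starts with occurs in it only once
-- (otherwise Python's "_, x = line.split(marker)" unpack raises ValueError)
def pvSafeLine (l : String) : Bool :=
  (!PySem.Str.startswith l "read_date: " || PySem.Str.count l "read_date: " == 1) &&
  (!PySem.Str.startswith l "  score: " || PySem.Str.count l "  score: " == 1) &&
  (!PySem.Str.startswith l "  link_url: " || PySem.Str.count l "  link_url: " == 1)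

-- the lines A processes with triple_underscores == 1: strictly after the first '---' line
-- and before the next '---' line
def pvRegion (contents : String) : List String :=
  let ls := (PySem.Str.split? contents "\n").getD []
  (ls.drop (ls.findIdx pvMarker + 1)).takeWhile (fun l => !pvMarker l)

-- Pre_ excludes exactly the inputs where A raises ValueError: a frontmatter line that
-- starts with one of the renamed field markers and contains that marker a second time
def Pre_translate_frontmatter_py (contents : String) : Prop :=
  (pvRegion contents).all pvSafeLine = true
instance (contents : String) : Decidable (Pre_translate_frontmatter_py contents) := by
  unfold Pre_translate_frontmatter_py; infer_instance

def pvWitness_translate_frontmatter_py : String :=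
  "---\ntitle: A Book\nread_date: 2020-01-01\n  score: 5\nextra: x\n---\nbody"

def Spec_translate_frontmatter_py (contents : String) (out : String) : Prop :=
  out = translate_frontmatter_py_alt contents
instance (contents : String) (out : String) : Decidable (Spec_translate_frontmatter_py contents out) := by
  unfold Spec_translate_frontmatter_py; infer_instance

-- ===== CLAIM (what is proved, stated in full; the proofs are below) =====
def Claim_equal_translate_frontmatter_py : Prop :=
  ∀ (contents : String), Dom_translate_frontmatter_py contents →
    Pre_translate_frontmatter_py contents →
      Spec_translate_frontmatter_py contents (translate_frontmatter_py contents)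

-- ===== LEMMAS AND PROOFS =====

-- A's loop with the accumulator factored out
def pvRecA (c : Int) : List String → List String
  | [] => []
  | l :: ls => (pvStepA (c, []) l).2 ++ pvRecA (pvStepA (c, []) l).1 ls

theorem pvStepA_acc (c : Int) (acc : List String) (l : String) :
    pvStepA (c, acc) l = ((pvStepA (c, []) l).1, acc ++ (pvStepA (c, []) l).2) := by
  unfold pvStepA
  repeat' split
  all_goals simp_all

theorem pv_foldl_eq_recA (ls : List String) : ∀ (c : Int) (acc : List String),
    (ls.foldl pvStepA (c, acc)).2 = acc ++ pvRecA c ls := by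
  induction ls with
  | nil => intro c acc; simp [pvRecA]
  | cons l ls ih =>
    intro c acc
    simp only [List.foldl_cons, pvRecA]
    rw [pvStepA_acc, ih, List.append_assoc]

theorem pvStepA_marker (c : Int) (l : String) (h : pvMarker l = true) :
    pvStepA (c, []) l = (c + 1, [l]) := by
  simp [pvStepA, h]

theorem pvStepA_ne_one (c : Int) (l : String) (h : pvMarker l = false) (hc : c ≠ 1) :
    pvStepA (c, []) l = (c, [l]) := by
  simp [pvStepA, h, hc]

theorem pvStepA_one (l : String) (h : pvMarker l = false) :
    pvStepA (1, []) l = (1, (pvTransformLine l).toList) := by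
  unfold pvStepA pvTransformLine pvRenames
  simp only [h, Bool.false_eq_true, if_false, if_true]
  by_cases h1 : PySem.Str.startswith l "read_date: " <;>
  by_cases h2 : PySem.Str.startswith l "  score: " <;>
  by_cases h3 : PySem.Str.startswith l "  link_url: " <;>
  simp [List.find?, h1, h2, h3] <;>
  (try cases hu : pvUnpack2 (PySem.Str.split? l "read_date: ")) <;>
  (try cases hu2 : pvUnpack2 (PySem.Str.split? l "  score: ")) <;>
  (try cases hu3 : pvUnpack2 (PySem.Str.split? l "  link_url: ")) <;>
  (try split) <;> simp_all
  all_goals split <;> simp_all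

theorem pvRecA_flat (c : Int) (ls : List String) (hc : c ≠ 1)
    (h : ∀ l ∈ ls, pvMarker l = false) : pvRecA c ls = ls := by
  induction ls with
  | nil => rfl
  | cons l ls ih =>
    have hl := h l List.mem_cons_self
    simp only [pvRecA, pvStepA_ne_one c l hl hc]
    simpa using ih (fun x hx => h x (List.mem_cons_of_mem _ hx))

theorem pvRecA_ge_two (ls : List String) : ∀ (c : Int), 2 ≤ c → pvRecA c ls = ls := by
  induction ls with
  | nil => intro c _; rfl
  | cons l ls ih =>
    intro c hc
    by_cases hl : pvMarker l = true
    · simp only [pvRecA, pvStepA_marker c l hl]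
      simpa using ih (c + 1) (by omega)
    · simp only [pvRecA, pvStepA_ne_one c l (by simpa using hl) (by omega)]
      simpa using ih c hc

theorem pvRecA_zero_pre (pre rest : List String)
    (h : ∀ l ∈ pre, pvMarker l = false) :
    pvRecA 0 (pre ++ rest) = pre ++ pvRecA 0 rest := by
  induction pre with
  | nil => rfl
  | cons l pre ih =>
    have hl := h l List.mem_cons_self
    simp only [List.cons_append, pvRecA, pvStepA_ne_one 0 l hl (by omega)]
    simp [ih (fun x hx => h x (List.mem_cons_of_mem _ hx))]

theorem pvRecA_one (mid rest : List String)
    (h : ∀ l ∈ mid, pvMarker l = false) :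
    pvRecA 1 (mid ++ rest) = mid.filterMap pvTransformLine ++ pvRecA 1 rest := by
  induction mid with
  | nil => rfl
  | cons l mid ih =>
    have hl := h l List.mem_cons_self
    simp only [List.cons_append, pvRecA, pvStepA_one l hl]
    rw [ih (fun x hx => h x (List.mem_cons_of_mem _ hx))]
    cases ht : pvTransformLine l <;> simp [List.filterMap_cons, ht]

theorem pv_forall_take_findIdx (p : String → Bool) (ls : List String) :
    ∀ l ∈ ls.take (ls.findIdx p), p l = false := by
  intro l hl
  rw [List.mem_take_iff_getElem] at hl
  obtain ⟨k, hk, rfl⟩ := hl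
  exact List.not_of_lt_findIdx (by omega)

-- the core list-level equivalence
theorem pv_core (ls : List String) :
    pvRecA 0 ls =
      ls.take (ls.findIdx pvMarker + 1) ++
        ((ls.drop (ls.findIdx pvMarker + 1)).take
            ((ls.drop (ls.findIdx pvMarker + 1)).findIdx pvMarker)).filterMap pvTransformLine ++
        (ls.drop (ls.findIdx pvMarker + 1)).drop
            ((ls.drop (ls.findIdx pvMarker + 1)).findIdx pvMarker) := by
  by_cases hi : ls.findIdx pvMarker < ls.length
  · have hm : pvMarker (ls[ls.findIdx pvMarker]) = true := List.findIdx_getElem (w := hi)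
    have hdecomp : ls = ls.take (ls.findIdx pvMarker) ++
        ls[ls.findIdx pvMarker] :: ls.drop (ls.findIdx pvMarker + 1) := by
      conv_lhs => rw [← List.take_append_drop (ls.findIdx pvMarker) ls,
        List.drop_eq_getElem_cons hi]
    set i := ls.findIdx pvMarker with hidef
    set body := ls.drop (i + 1) with hbody
    have htake : ls.take (i + 1) = ls.take i ++ [ls[i]] := by
      rw [List.take_succ]; simp [List.getElem?_eq_getElem hi]
    have hleft : pvRecA 0 ls = ls.take i ++ ls[i] :: pvRecA 1 body := by
      conv_lhs => rw [hdecomp]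
      rw [pvRecA_zero_pre _ _ (pv_forall_take_findIdx pvMarker ls)]
      simp only [pvRecA, pvStepA_marker 0 _ hm]
      simp [hidef]
    rw [hleft, htake]
    set k := body.findIdx pvMarker with hkdef
    by_cases hk : k < body.length
    · have hbm : pvMarker (body[k]) = true := List.findIdx_getElem (w := hk)
      have hbdecomp : body = body.take k ++ body[k] :: body.drop (k + 1) := by
        conv_lhs => rw [← List.take_append_drop k body, List.drop_eq_getElem_cons hk]
      have hmid : pvRecA 1 body =
          (body.take k).filterMap pvTransformLine ++ body[k] :: body.drop (k + 1) := by
        conv_lhs => rw [hbdecomp]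
        rw [pvRecA_one _ _ (pv_forall_take_findIdx pvMarker body)]
        simp only [pvRecA, pvStepA_marker 1 _ hbm]
        rw [pvRecA_ge_two (body.drop (k + 1)) (1 + 1) (by norm_num)]
        simp
        rw [hkdef]
      rw [hmid, ← List.drop_eq_getElem_cons hk]
      simp only [List.append_assoc, List.singleton_append, List.cons_append, List.nil_append]
    · have hkeq : k = body.length := le_antisymm List.findIdx_le_length (by omega)
      have hnb : ∀ l ∈ body, pvMarker l = false := by
        rw [← List.findIdx_eq_length]; omega
      have hmid : pvRecA 1 body = body.filterMap pvTransformLine := by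
        have := pvRecA_one body [] hnb
        simpa [pvRecA] using this
      rw [hmid, hkeq, List.take_length, List.drop_length, List.append_nil]
      simp only [List.append_assoc, List.singleton_append, List.cons_append, List.nil_append]
  · have hieq : ls.findIdx pvMarker = ls.length := le_antisymm List.findIdx_le_length (by omega)
    have hnm : ∀ l ∈ ls, pvMarker l = false := by rw [← List.findIdx_eq_length]; omega
    rw [pvRecA_flat 0 ls (by omega) hnm, hieq]
    simp [List.take_of_length_le (by omega : ls.length ≤ ls.length + 1),
      List.drop_eq_nil_of_le (by omega : ls.length ≤ ls.length + 1)]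

-- ===== VERDICT (by name: the statement is the Claim_ definition above) =====
theorem translate_frontmatter_py_spec : Claim_equal_translate_frontmatter_py := by
  intro contents _ _
  unfold Spec_translate_frontmatter_py translate_frontmatter_py translate_frontmatter_py_alt
  rw [pv_foldl_eq_recA, List.nil_append, pv_core]
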